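-- pv_equiv track=rewrite | github.com/Kimiaoo/unsw | 19T3 COMP9021/Quiz/quiz_7.py | max_number_of_spikes
-- ===== SOURCE A (Python) =====
-- def find_max_colour(shape):
--     # get the max colour in coloured grid
--     max_col = 2
--     for i in range(len(shape)):
--         for j in range(len(shape[0])):
--             if shape[i][j] > max_col:
--                 max_col = shape[i][j]
--     return max_col
--
-- def find_max_part(coloured_shape):
--     max_colour = find_max_colour(coloured_shape)
--     max_size = 0
--     most_col = []
--     for col in range(2, max_colour + 1):
--         count_size = 0
--         for i in range(len(coloured_shape)):
--             for j in range(len(coloured_shape[0])):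
--                 if coloured_shape[i][j] == col:
--                     count_size += 1
--         if count_size >= max_size:
--             max_size = count_size
--             most_col.append(col)
--     return most_col
--
-- def check_around(shape, col):
--     direction = [(0, 1), (0, -1), (-1, 0), (1, 0)]
--     spikes = 0
--     for cur_x in range(len(shape)):
--         for cur_y in range(len(shape[0])):
--             if shape[cur_x][cur_y] == col:
--                 count_col = 0
--                 for (dir_x, dir_y) in direction:
--                     around_x = cur_x + dir_x
--                     around_y = cur_y + dir_y
--                     if 0 <= around_x < len(shape) and 0 <= around_y < len(shape[0]):
--                         if shape[around_x][around_y] == col: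
--                             count_col += 1
--                 if count_col == 1:
--                     spikes += 1
--     return spikes
--
-- def max_number_of_spikes(nb_of_shapes):
--     max_part = find_max_part(nb_of_shapes)
--     result = 0
--     for i in range(len(max_part)):
--         res = check_around(nb_of_shapes, max_part[i])
--         if res > result:
--             result = res
--     return result
-- ===== SOURCE B (Python) =====
-- def max_number_of_spikes(nb_of_shapes):
--     # One pass over the grid: per-colour cell counts, per-colour spike counts
--     # (cells with exactly one same-colour orthogonal neighbour) and the max
--     # colour are all accumulated in dictionaries/vars; the per-colour grid
--     # rescans of the original are gone.
--     h = len(nb_of_shapes)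
--     w = len(nb_of_shapes[0]) if h else 0
--     counts = {}
--     spikes = {}
--     max_col = 2
--     for i in range(h):
--         for j in range(w):
--             c = nb_of_shapes[i][j]
--             counts[c] = counts.get(c, 0) + 1
--             nbrs = 0
--             if i > 0 and nb_of_shapes[i - 1][j] == c:
--                 nbrs += 1
--             if i + 1 < h and nb_of_shapes[i + 1][j] == c:
--                 nbrs += 1
--             if j > 0 and nb_of_shapes[i][j - 1] == c:
--                 nbrs += 1
--             if j + 1 < w and nb_of_shapes[i][j + 1] == c:
--                 nbrs += 1
--             if nbrs == 1:
--                 spikes[c] = spikes.get(c, 0) + 1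
--             if c > max_col:
--                 max_col = c
--     best_size = 0
--     result = 0
--     for col in range(2, max_col + 1):
--         cnt = counts.get(col, 0)
--         if cnt >= best_size:
--             best_size = cnt
--             sp = spikes.get(col, 0)
--             if sp > result:
--                 result = sp
--     return result
-- ===== Notes on version B (the rewrite author's own statement) =====
-- stated objective: faster
-- what changed: One pass over the grid accumulates per-colour cell counts, per-colour spike counts (cells with exactly one same-colour orthogonal neighbour) and the max colour in dictionaries, and one scan over the colour range fuses A's prefix-max selection with the final maximum; A's per-colour full-grid rescans (the counting loop and check_around) disappear.
import Mathlib
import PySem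

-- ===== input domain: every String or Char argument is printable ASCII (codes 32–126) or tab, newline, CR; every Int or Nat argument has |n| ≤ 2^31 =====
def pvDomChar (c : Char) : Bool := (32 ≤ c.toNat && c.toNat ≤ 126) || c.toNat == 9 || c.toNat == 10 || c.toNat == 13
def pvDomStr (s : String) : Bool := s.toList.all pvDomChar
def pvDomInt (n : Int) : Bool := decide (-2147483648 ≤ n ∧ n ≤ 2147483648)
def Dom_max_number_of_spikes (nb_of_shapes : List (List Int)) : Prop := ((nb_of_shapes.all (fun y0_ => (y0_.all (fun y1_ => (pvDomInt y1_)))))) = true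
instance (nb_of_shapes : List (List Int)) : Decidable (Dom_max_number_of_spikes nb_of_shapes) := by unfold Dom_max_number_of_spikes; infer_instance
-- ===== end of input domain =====

-- B replaces A's per-colour full-grid rescans by one pass that accumulates per-colour
-- cell counts, spike counts and the max colour in dictionaries (objective: faster).

-- ===== PORT A =====
def find_max_colour (shape : List (List Int)) : Int :=
  (PySem.List.pyRange 0 (shape.length : Int)).foldl (fun max_col i =>
    (PySem.List.pyRange 0 ((PySem.List.pyGetD shape 0 []).length : Int)).foldl (fun max_col j =>
      if PySem.List.pyGetD (PySem.List.pyGetD shape i []) j 0 > max_col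
      then PySem.List.pyGetD (PySem.List.pyGetD shape i []) j 0 else max_col) max_col) 2

def find_max_part (coloured_shape : List (List Int)) : List Int :=
  let max_colour := find_max_colour coloured_shape
  ((PySem.List.pyRange 2 (max_colour + 1)).foldl (fun (st : Int × List Int) col =>
      let count_size := (PySem.List.pyRange 0 (coloured_shape.length : Int)).foldl (fun cs i =>
          (PySem.List.pyRange 0 ((PySem.List.pyGetD coloured_shape 0 []).length : Int)).foldl (fun cs j =>
            if PySem.List.pyGetD (PySem.List.pyGetD coloured_shape i []) j 0 = col then cs + 1 else cs) cs) 0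
      if count_size ≥ st.1 then (count_size, st.2 ++ [col]) else st) ((0 : Int), ([] : List Int))).2

def check_around (shape : List (List Int)) (col : Int) : Int :=
  let direction : List (Int × Int) := [(0, 1), (0, -1), (-1, 0), (1, 0)]
  (PySem.List.pyRange 0 (shape.length : Int)).foldl (fun spikes cur_x =>
    (PySem.List.pyRange 0 ((PySem.List.pyGetD shape 0 []).length : Int)).foldl (fun spikes cur_y =>
      if PySem.List.pyGetD (PySem.List.pyGetD shape cur_x []) cur_y 0 = col then
        let count_col := direction.foldl (fun cc d =>
          let around_x := cur_x + d.1
          let around_y := cur_y + d.2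
          if 0 ≤ around_x ∧ around_x < (shape.length : Int) ∧ 0 ≤ around_y ∧ around_y < ((PySem.List.pyGetD shape 0 []).length : Int) then
            if PySem.List.pyGetD (PySem.List.pyGetD shape around_x []) around_y 0 = col then cc + 1 else cc
          else cc) (0 : Int)
        if count_col = 1 then spikes + 1 else spikes
      else spikes) spikes) 0

def max_number_of_spikes (nb_of_shapes : List (List Int)) : Int :=
  let max_part := find_max_part nb_of_shapes
  (PySem.List.pyRange 0 (max_part.length : Int)).foldl (fun result i =>
    let res := check_around nb_of_shapes (PySem.List.pyGetD max_part i 0)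
    if res > result then res else result) 0

-- ===== PORT B =====
def max_number_of_spikes_alt (nb_of_shapes : List (List Int)) : Int :=
  let h : Int := (nb_of_shapes.length : Int)
  let w : Int := if h ≠ 0 then ((PySem.List.pyGetD nb_of_shapes 0 []).length : Int) else 0
  let st := (PySem.List.pyRange 0 h).foldl (fun st i =>
      (PySem.List.pyRange 0 w).foldl (fun (st : (PySem.Dict Int Int × PySem.Dict Int Int) × Int) j =>
        let c := PySem.List.pyGetD (PySem.List.pyGetD nb_of_shapes i []) j 0
        let counts := st.1.1.insert c (st.1.1.getD c 0 + 1)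
        let nbrs0 : Int := 0
        let nbrs1 := if 0 < i ∧ PySem.List.pyGetD (PySem.List.pyGetD nb_of_shapes (i - 1) []) j 0 = c then nbrs0 + 1 else nbrs0
        let nbrs2 := if i + 1 < h ∧ PySem.List.pyGetD (PySem.List.pyGetD nb_of_shapes (i + 1) []) j 0 = c then nbrs1 + 1 else nbrs1
        let nbrs3 := if 0 < j ∧ PySem.List.pyGetD (PySem.List.pyGetD nb_of_shapes i []) (j - 1) 0 = c then nbrs2 + 1 else nbrs2
        let nbrs := if j + 1 < w ∧ PySem.List.pyGetD (PySem.List.pyGetD nb_of_shapes i []) (j + 1) 0 = c then nbrs3 + 1 else nbrs3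
        let spikes := if nbrs = 1 then st.1.2.insert c (st.1.2.getD c 0 + 1) else st.1.2
        let max_col := if c > st.2 then c else st.2
        ((counts, spikes), max_col)) st)
    ((PySem.Dict.empty, PySem.Dict.empty), (2 : Int))
  ((PySem.List.pyRange 2 (st.2 + 1)).foldl (fun (p : Int × Int) col =>
      let cnt := st.1.1.getD col 0
      if cnt ≥ p.1 then
        let sp := st.1.2.getD col 0
        (cnt, if sp > p.2 then sp else p.2)
      else p) ((0 : Int), (0 : Int))).2

-- ===== PRECONDITION & SPEC =====
-- Pre_ excludes exactly the inputs where Python A raises IndexError: a row shorter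
-- than the first row (A indexes every row at all columns of row 0).
def Pre_max_number_of_spikes (nb_of_shapes : List (List Int)) : Prop :=
  ∀ row ∈ nb_of_shapes, (PySem.List.pyGetD nb_of_shapes 0 []).length ≤ row.length
instance (nb_of_shapes : List (List Int)) : Decidable (Pre_max_number_of_spikes nb_of_shapes) := by unfold Pre_max_number_of_spikes; infer_instance
def pvWitness_max_number_of_spikes : List (List Int) := [[2, 2], [2, 3]]

def Spec_max_number_of_spikes (nb_of_shapes : List (List Int)) (out : Int) : Prop := out = max_number_of_spikes_alt nb_of_shapes
instance (nb_of_shapes : List (List Int)) (out : Int) : Decidable (Spec_max_number_of_spikes nb_of_shapes out) := by unfold Spec_max_number_of_spikes; infer_instance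

-- ===== CLAIM (what is proved, stated in full; the proofs are below) =====
def Claim_equal_max_number_of_spikes : Prop := ∀ (nb_of_shapes : List (List Int)), Dom_max_number_of_spikes nb_of_shapes → Pre_max_number_of_spikes nb_of_shapes → Spec_max_number_of_spikes nb_of_shapes (max_number_of_spikes nb_of_shapes)

-- ===== LEMMAS AND PROOFS =====

-- cell access, grid dimensions, index list (proof-side abbreviations)
def pvAt (g : List (List Int)) (i j : Int) : Int := PySem.List.pyGetD (PySem.List.pyGetD g i []) j 0
def pvH (g : List (List Int)) : Int := (g.length : Int)
def pvW (g : List (List Int)) : Int := ((PySem.List.pyGetD g 0 []).length : Int)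
def pvIdxs (h w : Int) : List (Int × Int) :=
  (PySem.List.pyRange 0 h).flatMap (fun i => (PySem.List.pyRange 0 w).map (fun j => (i, j)))

-- B's neighbour count at a cell, as one expression
def pvNbr (g : List (List Int)) (i j : Int) : Int :=
  let c := pvAt g i j
  let n1 : Int := if 0 < i ∧ pvAt g (i - 1) j = c then 0 + 1 else 0
  let n2 := if i + 1 < pvH g ∧ pvAt g (i + 1) j = c then n1 + 1 else n1
  let n3 := if 0 < j ∧ pvAt g i (j - 1) = c then n2 + 1 else n2
  if j + 1 < pvW g ∧ pvAt g i (j + 1) = c then n3 + 1 else n3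

def pvCounts (g : List (List Int)) : PySem.Dict Int Int :=
  (pvIdxs (pvH g) (pvW g)).foldl (fun d p => d.insert (pvAt g p.1 p.2) (d.getD (pvAt g p.1 p.2) 0 + 1)) PySem.Dict.empty
def pvSpikes (g : List (List Int)) : PySem.Dict Int Int :=
  (pvIdxs (pvH g) (pvW g)).foldl (fun d p => if pvNbr g p.1 p.2 = 1 then d.insert (pvAt g p.1 p.2) (d.getD (pvAt g p.1 p.2) 0 + 1) else d) PySem.Dict.empty
def pvMaxCol (g : List (List Int)) : Int :=
  (pvIdxs (pvH g) (pvW g)).foldl (fun m p => if pvAt g p.1 p.2 > m then pvAt g p.1 p.2 else m) 2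

-- nested range loop = loop over the index-pair list
theorem pv_nested_fold {β : Type} (h w : Int) (f : β → Int → Int → β) (init : β) :
    (PySem.List.pyRange 0 h).foldl (fun a i => (PySem.List.pyRange 0 w).foldl (fun a j => f a i j) a) init
      = (pvIdxs h w).foldl (fun a p => f a p.1 p.2) init := by
  simp [pvIdxs, List.foldl_flatMap, List.foldl_map]

theorem pv_mem_idxs (h w : Int) (p : Int × Int) :
    p ∈ pvIdxs h w ↔ (0 ≤ p.1 ∧ p.1 < h ∧ 0 ≤ p.2 ∧ p.2 < w) := by
  obtain ⟨a, b⟩ := p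
  simp [pvIdxs, List.mem_flatMap, PySem.List.mem_pyRange_one]
  aesop

theorem pv_foldl_triple {β σ1 σ2 σ3 : Type} (f : σ1 → β → σ1) (g : σ2 → β → σ2) (h : σ3 → β → σ3)
    (l : List β) (a : σ1) (b : σ2) (c : σ3) :
    l.foldl (fun s e => ((f s.1.1 e, g s.1.2 e), h s.2 e)) ((a, b), c)
      = ((l.foldl f a, l.foldl g b), l.foldl h c) := by
  induction l generalizing a b c with
  | nil => rfl
  | cons x xs ih => simpa using ih (f a x) (g b x) (h c x)

-- B's main fold splits into the three independent folds
theorem pvB_split (g : List (List Int)) :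
    ((PySem.List.pyRange 0 (g.length : Int)).foldl (fun st i =>
      (PySem.List.pyRange 0 ((PySem.List.pyGetD g 0 []).length : Int)).foldl (fun (st : (PySem.Dict Int Int × PySem.Dict Int Int) × Int) j =>
        let c := PySem.List.pyGetD (PySem.List.pyGetD g i []) j 0
        let counts := st.1.1.insert c (st.1.1.getD c 0 + 1)
        let nbrs0 : Int := 0
        let nbrs1 := if 0 < i ∧ PySem.List.pyGetD (PySem.List.pyGetD g (i - 1) []) j 0 = c then nbrs0 + 1 else nbrs0
        let nbrs2 := if i + 1 < (g.length : Int) ∧ PySem.List.pyGetD (PySem.List.pyGetD g (i + 1) []) j 0 = c then nbrs1 + 1 else nbrs1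
        let nbrs3 := if 0 < j ∧ PySem.List.pyGetD (PySem.List.pyGetD g i []) (j - 1) 0 = c then nbrs2 + 1 else nbrs2
        let nbrs := if j + 1 < ((PySem.List.pyGetD g 0 []).length : Int) ∧ PySem.List.pyGetD (PySem.List.pyGetD g i []) (j + 1) 0 = c then nbrs3 + 1 else nbrs3
        let spikes := if nbrs = 1 then st.1.2.insert c (st.1.2.getD c 0 + 1) else st.1.2
        let max_col := if c > st.2 then c else st.2
        ((counts, spikes), max_col)) st)
      ((PySem.Dict.empty, PySem.Dict.empty), (2 : Int)))
    = ((pvCounts g, pvSpikes g), pvMaxCol g) := by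
  rw [pv_nested_fold]
  exact pv_foldl_triple
    (fun (d : PySem.Dict Int Int) (p : Int × Int) => d.insert (pvAt g p.1 p.2) (d.getD (pvAt g p.1 p.2) 0 + 1))
    (fun (d : PySem.Dict Int Int) (p : Int × Int) => if pvNbr g p.1 p.2 = 1 then d.insert (pvAt g p.1 p.2) (d.getD (pvAt g p.1 p.2) 0 + 1) else d)
    (fun (m : Int) (p : Int × Int) => if pvAt g p.1 p.2 > m then pvAt g p.1 p.2 else m)
    (pvIdxs (pvH g) (pvW g)) PySem.Dict.empty PySem.Dict.empty 2

theorem pv_getD_foldl_cond_insert (q : (Int × Int) → Prop) [DecidablePred q] (f : (Int × Int) → Int)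
    (l : List (Int × Int)) : ∀ (d : PySem.Dict Int Int) (k : Int),
    (l.foldl (fun d p => if q p then d.insert (f p) (d.getD (f p) 0 + 1) else d) d).getD k 0
      = d.getD k 0 + (l.countP (fun p => decide (q p) && (f p == k)) : Int) := by
  induction l with
  | nil => simp
  | cons x xs ih =>
    intro d k
    simp only [List.foldl_cons, List.countP_cons]
    by_cases hq : q x
    · by_cases hk : f x = k
      · simp [hq, hk, ih]; ring
      · simp [hq, hk, ih, PySem.Dict.getD_insert, Ne.symm hk]
    · simp [hq, ih]

theorem pv_counts_getD (g : List (List Int)) (col : Int) :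
    (pvCounts g).getD col 0 = ((pvIdxs (pvH g) (pvW g)).countP (fun p => pvAt g p.1 p.2 == col) : Int) := by
  unfold pvCounts
  rw [← List.foldl_map (f := fun p : Int × Int => pvAt g p.1 p.2)
        (g := fun (d : PySem.Dict Int Int) x => d.insert x (d.getD x 0 + 1)),
      PySem.Dict.getD_foldl_insert_add_one]
  simp [List.count_eq_countP, List.countP_map, Function.comp_def]

theorem pv_spikes_getD (g : List (List Int)) (col : Int) :
    (pvSpikes g).getD col 0
      = ((pvIdxs (pvH g) (pvW g)).countP (fun p => decide (pvNbr g p.1 p.2 = 1) && (pvAt g p.1 p.2 == col)) : Int) := by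
  unfold pvSpikes
  rw [pv_getD_foldl_cond_insert (fun p => pvNbr g p.1 p.2 = 1) (fun p => pvAt g p.1 p.2)]
  simp

-- A's 4-direction scan agrees with B's neighbour chain on in-range cells
set_option maxHeartbeats 2000000 in
theorem pv_around_eq (g : List (List Int)) (i j col : Int)
    (hi0 : 0 ≤ i) (hih : i < pvH g) (hj0 : 0 ≤ j) (hjw : j < pvW g)
    (hc : PySem.List.pyGetD (PySem.List.pyGetD g i []) j 0 = col) :
    ([((0 : Int), (1 : Int)), (0, -1), (-1, 0), (1, 0)]).foldl (fun cc d =>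
        if 0 ≤ i + d.1 ∧ i + d.1 < (g.length : Int) ∧ 0 ≤ j + d.2 ∧ j + d.2 < ((PySem.List.pyGetD g 0 []).length : Int) then
          if PySem.List.pyGetD (PySem.List.pyGetD g (i + d.1) []) (j + d.2) 0 = col then cc + 1 else cc
        else cc) 0 = pvNbr g i j := by
  simp only [pvNbr, pvAt, pvH, pvW] at *
  subst hc
  simp only [List.foldl_cons, List.foldl_nil]
  simp [hi0, hih, hj0, hjw,
        show ((0 : Int) ≤ j + 1) from by omega,
        show ((0 : Int) ≤ i + 1) from by omega,
        show ((0 : Int) ≤ j + -1) ↔ 0 < j from by omega,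
        show ((0 : Int) ≤ i + -1) ↔ 0 < i from by omega,
        show (j + -1 < ((PySem.List.pyGetD g 0 []).length : Int)) from by omega,
        show (i + -1 < (g.length : Int)) from by omega,
        sub_eq_add_neg]
  split_ifs <;> omega

theorem pv_check_eq (g : List (List Int)) (col : Int) :
    check_around g col = (pvSpikes g).getD col 0 := by
  rw [pv_spikes_getD]
  simp only [check_around]
  rw [pv_nested_fold ((g.length : Int)) (((PySem.List.pyGetD g 0 []).length : Int))]
  rw [PySem.List.foldl_congr_mem _ _
        (fun (s : Int) (p : Int × Int) =>
          if (decide (pvNbr g p.1 p.2 = 1) && (pvAt g p.1 p.2 == col)) = true then s + 1 else s) _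
        ?_]
  · rw [PySem.List.foldl_count_if]
    simp [pvIdxs, pvH, pvW]
  · intro acc p hp
    have hb := (pv_mem_idxs _ _ p).1 hp
    by_cases h : PySem.List.pyGetD (PySem.List.pyGetD g p.1 []) p.2 0 = col
    · have ha := pv_around_eq g p.1 p.2 col hb.1 hb.2.1 hb.2.2.1 hb.2.2.2 h
      simp only [h, if_pos]
      rw [ha]
      by_cases h1 : pvNbr g p.1 p.2 = 1 <;> simp [pvAt, h, h1]
    · simp [h, pvAt]

theorem pv_cnt_eq (g : List (List Int)) (col : Int) :
    (PySem.List.pyRange 0 (g.length : Int)).foldl (fun cs i =>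
        (PySem.List.pyRange 0 ((PySem.List.pyGetD g 0 []).length : Int)).foldl (fun cs j =>
          if PySem.List.pyGetD (PySem.List.pyGetD g i []) j 0 = col then cs + 1 else cs) cs) 0
      = (pvCounts g).getD col 0 := by
  rw [pv_counts_getD]
  rw [pv_nested_fold ((g.length : Int)) (((PySem.List.pyGetD g 0 []).length : Int))
        (fun (cs : Int) i j => if PySem.List.pyGetD (PySem.List.pyGetD g i []) j 0 = col then cs + 1 else cs)]
  rw [show (fun (a : Int) (p : Int × Int) =>
        if PySem.List.pyGetD (PySem.List.pyGetD g p.1 []) p.2 0 = col then a + 1 else a)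
      = (fun (a : Int) (p : Int × Int) =>
        if (pvAt g p.1 p.2 == col) = true then a + 1 else a) from by
    funext a p; by_cases h : pvAt g p.1 p.2 = col <;> simp [pvAt] at h ⊢]
  rw [PySem.List.foldl_count_if]
  simp [pvIdxs, pvH, pvW]

theorem pv_mc_eq (g : List (List Int)) : find_max_colour g = pvMaxCol g := by
  unfold find_max_colour pvMaxCol pvAt pvH pvW
  exact pv_nested_fold _ _ _ _

-- the selection fold only appends to its list component
theorem pv_sel_append (cnt : Int → Int) (l : List Int) (ms : Int) (acc : List Int) :
    l.foldl (fun (st : Int × List Int) col => if cnt col ≥ st.1 then (cnt col, st.2 ++ [col]) else st) (ms, acc)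
      = ((l.foldl (fun (st : Int × List Int) col => if cnt col ≥ st.1 then (cnt col, st.2 ++ [col]) else st) (ms, [])).1,
         acc ++ (l.foldl (fun (st : Int × List Int) col => if cnt col ≥ st.1 then (cnt col, st.2 ++ [col]) else st) (ms, [])).2) := by
  induction l generalizing ms acc with
  | nil => simp
  | cons x xs ih =>
    simp only [List.foldl_cons, List.nil_append]
    by_cases h : cnt x ≥ ms
    · simp only [if_pos h]
      rw [ih (cnt x) (acc ++ [x]), ih (cnt x) [x]]
      simp
    · simp only [if_neg h]
      exact ih ms acc

-- B's fused loop = A's selection loop followed by A's max loop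
theorem pv_fuse (cnt f : Int → Int) (l : List Int) (ms r : Int) :
    l.foldl (fun (p : Int × Int) col => if cnt col ≥ p.1 then (cnt col, if f col > p.2 then f col else p.2) else p) (ms, r)
      = ((l.foldl (fun (st : Int × List Int) col => if cnt col ≥ st.1 then (cnt col, st.2 ++ [col]) else st) (ms, [])).1,
         (l.foldl (fun (st : Int × List Int) col => if cnt col ≥ st.1 then (cnt col, st.2 ++ [col]) else st) (ms, [])).2.foldl
           (fun r col => if f col > r then f col else r) r) := by
  induction l generalizing ms r with
  | nil => simp
  | cons x xs ih =>
    simp only [List.foldl_cons, List.nil_append]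
    by_cases h : cnt x ≥ ms
    · simp only [if_pos h]
      rw [ih, pv_sel_append cnt xs (cnt x) [x]]
      simp
    · simp only [if_neg h]
      exact ih ms r

-- ===== VERDICT (by name: the statement is the Claim_ definition above) =====
theorem max_number_of_spikes_spec : Claim_equal_max_number_of_spikes := by
  intro g _dom _pre
  unfold Spec_max_number_of_spikes
  have hw : (if (g.length : Int) ≠ 0 then ((PySem.List.pyGetD g 0 []).length : Int) else 0)
      = ((PySem.List.pyGetD g 0 []).length : Int) := by
    rcases g with _ | ⟨r, t⟩
    · simp [PySem.List.pyGetD]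
    · rw [if_pos (by simp; omega)]
  simp only [max_number_of_spikes, max_number_of_spikes_alt, find_max_part]
  simp only [hw]
  rw [pvB_split]
  simp only []
  rw [pv_mc_eq]
  rw [show (fun (st : Int × List Int) col =>
        if (PySem.List.pyRange 0 (g.length : Int)).foldl (fun cs i =>
            (PySem.List.pyRange 0 ((PySem.List.pyGetD g 0 []).length : Int)).foldl (fun cs j =>
              if PySem.List.pyGetD (PySem.List.pyGetD g i []) j 0 = col then cs + 1 else cs) cs) 0 ≥ st.1
        then ((PySem.List.pyRange 0 (g.length : Int)).foldl (fun cs i =>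
            (PySem.List.pyRange 0 ((PySem.List.pyGetD g 0 []).length : Int)).foldl (fun cs j =>
              if PySem.List.pyGetD (PySem.List.pyGetD g i []) j 0 = col then cs + 1 else cs) cs) 0, st.2 ++ [col])
        else st)
      = (fun (st : Int × List Int) col =>
        if (pvCounts g).getD col 0 ≥ st.1 then ((pvCounts g).getD col 0, st.2 ++ [col]) else st) from by
    funext st col
    rw [pv_cnt_eq]]
  rw [pv_fuse (fun col => (pvCounts g).getD col 0) (fun col => (pvSpikes g).getD col 0)
        (PySem.List.pyRange 2 (pvMaxCol g + 1)) 0 0]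
  generalize (List.foldl (fun (st : Int × List Int) col =>
      if (pvCounts g).getD col 0 ≥ st.1 then ((pvCounts g).getD col 0, st.2 ++ [col]) else st)
      ((0 : Int), ([] : List Int)) (PySem.List.pyRange 2 (pvMaxCol g + 1))) = S
  rw [PySem.List.foldl_pyRange_zero_pyGetD' S.2 0
        (fun result v => if check_around g v > result then check_around g v else result) 0]
  rw [show (fun (result col : Int) => if check_around g col > result then check_around g col else result)
      = (fun (result col : Int) => if (pvSpikes g).getD col 0 > result then (pvSpikes g).getD col 0 else result) from by
    funext result col
    rw [pv_check_eq]]
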